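-- pv_equiv track=rewrite | github.com/akshukatkar/bbtools | linkfc.py | getContext
-- ===== SOURCE A (Python) =====
-- def getContext(list_matches, content, include_delimiter=0, context_delimiter_str="\n"):
--     '''
--     Parse Input
--     list_matches:       list of tuple (link, start_index, end_index)
--     content:            content to search for the context
--     include_delimiter   Set 1 to include delimiter in context
--     '''
--     items = []
--     for m in list_matches:
--         match_str = m[0]
--         match_start = m[1]
--         match_end = m[2]
--         context_start_index = match_start
--         context_end_index = match_end
--         delimiter_len = len(context_delimiter_str)
--         content_max_index = len(content) - 1
--
--         while content[context_start_index] != context_delimiter_str and context_start_index > 0: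
--             context_start_index = context_start_index - 1
--
--         while content[context_end_index] != context_delimiter_str and context_end_index < content_max_index:
--             context_end_index = context_end_index + 1
--
--         if include_delimiter:
--             context = content[context_start_index: context_end_index]
--         else:
--             context = content[context_start_index + delimiter_len: context_end_index]
--
--         item = {
--             "link": match_str,
--             "context": context
--         }
--         items.append(item)
--
--     return items
-- ===== SOURCE B (Python) =====
-- def getContext(list_matches, content, include_delimiter=0, context_delimiter_str="\n"):
--     # Precompute, in two O(n) passes, a mapping from each index to the nearest
--     # delimiter position at-or-before / at-or-after it, then answer each match
--     # with two O(1) lookups.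
--     n = len(content)
--     dlen = len(context_delimiter_str)
--     prev = {}
--     last = 0
--     for i in range(n):
--         if content[i] == context_delimiter_str:
--             last = i
--         prev[i] = last
--     nxt = {}
--     v = n - 1
--     for i in reversed(range(n)):
--         if content[i] == context_delimiter_str:
--             v = i
--         nxt[i] = v
--     items = []
--     for link, s, e in list_matches:
--         cs = prev[s]
--         ce = nxt[e]
--         if include_delimiter:
--             context = content[cs:ce]
--         else:
--             context = content[cs + dlen:ce]
--         items.append({"link": link, "context": context})
--     return items
-- ===== Notes on version B (the rewrite author's own statement) =====
-- stated objective: faster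
-- what changed: Instead of scanning the content left and right from every match (O(m*n)), B precomputes in two linear passes a mapping from each index to the nearest delimiter position at-or-before and at-or-after it and answers each match with two O(1) lookups.
-- outside the precondition, e.g. on getContext([('', -1, 1)], 'ab', 1, ','): A returns [{'link': '', 'context': ''}], B raises KeyError; on getContext([('x', 2, 0)], 'ab', 0, '\n'): A raises IndexError, B raises KeyError
import Mathlib
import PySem

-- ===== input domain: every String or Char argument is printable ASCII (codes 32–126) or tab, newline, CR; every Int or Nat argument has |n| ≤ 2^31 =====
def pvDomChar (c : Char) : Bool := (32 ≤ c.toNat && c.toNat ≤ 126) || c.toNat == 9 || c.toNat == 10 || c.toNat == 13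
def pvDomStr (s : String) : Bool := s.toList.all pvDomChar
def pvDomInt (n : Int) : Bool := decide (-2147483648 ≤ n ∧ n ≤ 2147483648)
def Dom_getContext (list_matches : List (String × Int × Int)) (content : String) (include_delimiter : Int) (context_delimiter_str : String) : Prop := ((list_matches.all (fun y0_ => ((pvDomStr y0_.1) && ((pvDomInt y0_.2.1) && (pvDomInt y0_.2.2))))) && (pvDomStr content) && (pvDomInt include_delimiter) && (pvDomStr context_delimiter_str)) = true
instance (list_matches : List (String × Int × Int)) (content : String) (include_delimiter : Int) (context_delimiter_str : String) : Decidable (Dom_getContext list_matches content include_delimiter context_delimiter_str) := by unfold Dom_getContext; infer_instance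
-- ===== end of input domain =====

-- B replaces A's per-match left/right scans through the content by two linear precomputed
-- nearest-delimiter tables with O(1) lookup per match (objective: faster).

-- ===== PORT A =====

-- Python's `content[i] == context_delimiter_str`: the one-character string at index i compared
-- with the delimiter string.  Where content[i] would raise IndexError (index out of range —
-- excluded by Pre_) this returns false.
def pvCharEq (content : String) (i : Int) (d : String) : Bool :=
  match PySem.Str.pyGet? content i with
  | some c => String.ofList [c] == d
  | none => false

-- `while content[i] != d and i > 0: i -= 1`
def pvScanDown (content d : String) (i : Int) : Int :=
  if pvCharEq content i d = false ∧ 0 < i then pvScanDown content d (i - 1) else i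
termination_by i.toNat
decreasing_by omega

-- `while content[i] != d and i < nmax: i += 1`
def pvScanUp (content d : String) (nmax i : Int) : Int :=
  if pvCharEq content i d = false ∧ i < nmax then pvScanUp content d nmax (i + 1) else i
termination_by (nmax - i).toNat
decreasing_by omega

def getContext (list_matches : List (String × Int × Int)) (content : String) (include_delimiter : Int) (context_delimiter_str : String) : List (List (String × String)) :=
  list_matches.foldl (fun items m =>
    let match_str := m.1
    let match_start := m.2.1
    let match_end := m.2.2
    let delimiter_len := PySem.Str.len context_delimiter_str
    let content_max_index := PySem.Str.len content - 1
    let context_start_index := pvScanDown content context_delimiter_str match_start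
    let context_end_index := pvScanUp content context_delimiter_str content_max_index match_end
    let context :=
      if include_delimiter ≠ 0 then
        PySem.Str.slice content (some context_start_index) (some context_end_index)
      else
        PySem.Str.slice content (some (context_start_index + delimiter_len)) (some context_end_index)
    items ++ [[("link", match_str), ("context", context)]]) []

-- ===== PORT B =====

-- `prev`: index → nearest delimiter position at-or-before it (0 if none), one forward pass.
def pvBuildPrev (content d : String) : PySem.Dict Int Int :=
  ((List.range (PySem.Str.len content).toNat).foldl
    (fun (st : Int × PySem.Dict Int Int) (i : Nat) =>
      let last := if pvCharEq content (i : Int) d then (i : Int) else st.1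
      (last, st.2.insert (i : Int) last)) ((0 : Int), PySem.Dict.empty)).2

-- `nxt`: index → nearest delimiter position at-or-after it (n-1 if none), one backward pass.
def pvBuildNxt (content d : String) : PySem.Dict Int Int :=
  ((List.range (PySem.Str.len content).toNat).reverse.foldl
    (fun (st : Int × PySem.Dict Int Int) (i : Nat) =>
      let v := if pvCharEq content (i : Int) d then (i : Int) else st.1
      (v, st.2.insert (i : Int) v)) ((PySem.Str.len content - 1 : Int), PySem.Dict.empty)).2

def getContext_alt (list_matches : List (String × Int × Int)) (content : String) (include_delimiter : Int) (context_delimiter_str : String) : List (List (String × String)) :=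
  let dlen := PySem.Str.len context_delimiter_str
  let prev := pvBuildPrev content context_delimiter_str
  let nxt := pvBuildNxt content context_delimiter_str
  list_matches.foldl (fun items m =>
    -- prev[s] / nxt[e]: KeyError when the key is absent — Pre_ guarantees 0 ≤ index < len(content),
    -- where the key is present and the default is never read
    let cs := PySem.Dict.getD prev m.2.1 0
    let ce := PySem.Dict.getD nxt m.2.2 0
    let context :=
      if include_delimiter ≠ 0 then
        PySem.Str.slice content (some cs) (some ce)
      else
        PySem.Str.slice content (some (cs + dlen)) (some ce)
    items ++ [[("link", m.1), ("context", context)]]) []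

-- ===== PRECONDITION & SPEC =====

-- Pre_ restricts the match indices to the function's natural domain, 0 ≤ index < len(content):
-- outside it A raises IndexError (index ≥ len or < -len, or empty content with a match) or, for
-- malformed negative indices, returns via Python's negative-index wraparound, where B's
-- index-to-delimiter-position mapping has no entry and B raises KeyError.
def Pre_getContext (list_matches : List (String × Int × Int)) (content : String) (include_delimiter : Int) (context_delimiter_str : String) : Prop :=
  ∀ m ∈ list_matches, 0 ≤ m.2.1 ∧ m.2.1 < (content.toList.length : Int) ∧
    0 ≤ m.2.2 ∧ m.2.2 < (content.toList.length : Int)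
instance (list_matches : List (String × Int × Int)) (content : String) (include_delimiter : Int) (context_delimiter_str : String) : Decidable (Pre_getContext list_matches content include_delimiter context_delimiter_str) := by unfold Pre_getContext; infer_instance

def pvWitness_getContext : (List (String × Int × Int)) × String × Int × String :=
  ([("a", 1, 2)], "x\nyz", 0, "\n")

def Spec_getContext (list_matches : List (String × Int × Int)) (content : String) (include_delimiter : Int) (context_delimiter_str : String) (out : List (List (String × String))) : Prop := out = getContext_alt list_matches content include_delimiter context_delimiter_str
instance (list_matches : List (String × Int × Int)) (content : String) (include_delimiter : Int) (context_delimiter_str : String) (out : List (List (String × String))) : Decidable (Spec_getContext list_matches content include_delimiter context_delimiter_str out) := by unfold Spec_getContext; infer_instance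

-- ===== CLAIM (what is proved, stated in full; the proofs are below) =====
def Claim_equal_getContext : Prop := ∀ (list_matches : List (String × Int × Int)) (content : String) (include_delimiter : Int) (context_delimiter_str : String), Dom_getContext list_matches content include_delimiter context_delimiter_str → Pre_getContext list_matches content include_delimiter context_delimiter_str → Spec_getContext list_matches content include_delimiter context_delimiter_str (getContext list_matches content include_delimiter context_delimiter_str)

-- ===== LEMMAS AND PROOFS =====

-- The value prev[k]: nearest delimiter position ≤ k, else 0.
def pvLastD (content d : String) : Nat → Int
  | 0 => 0
  | (k + 1) => if pvCharEq content ((k + 1 : Nat) : Int) d then ((k + 1 : Nat) : Int)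
               else pvLastD content d k

-- The value nxt[k] for a table of length n: nearest delimiter position ≥ k, else n-1.
def pvNextD (content d : String) (n k : Nat) : Int :=
  if pvCharEq content (k : Int) d ∨ n ≤ k + 1 then (k : Int) else pvNextD content d n (k + 1)
termination_by n - k
decreasing_by simp_all; omega

theorem pvWitness_sat : Dom_getContext pvWitness_getContext.1 pvWitness_getContext.2.1 pvWitness_getContext.2.2.1 pvWitness_getContext.2.2.2 ∧ Pre_getContext pvWitness_getContext.1 pvWitness_getContext.2.1 pvWitness_getContext.2.2.1 pvWitness_getContext.2.2.2 := by
  constructor <;> decide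

theorem pvScanDown_eq_lastD (content d : String) (k : Nat) :
    pvScanDown content d (k : Int) = pvLastD content d k := by
  induction k with
  | zero => rw [pvScanDown]; simp [pvLastD]
  | succ k ih =>
    rw [pvScanDown, pvLastD]
    push_cast
    by_cases h : pvCharEq content ((k : Int) + 1) d
    · rw [if_neg (by simp [h]), if_pos h]
    · rw [if_pos ⟨by simp [h], by omega⟩, if_neg h,
        show (k : Int) + 1 - 1 = (k : Int) by ring, ih]

theorem pvScanUp_eq_nextD (content d : String) (n k : Nat) :
    pvScanUp content d ((n : Int) - 1) (k : Int) = pvNextD content d n k := by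
  rw [pvScanUp, pvNextD]
  by_cases h : pvCharEq content (k : Int) d
  · simp [h]
  · by_cases hb : n ≤ k + 1
    · rw [if_neg (by rintro ⟨-, h2⟩; omega), if_pos (Or.inr hb)]
    · have hadd : (k : Int) + 1 = ((k + 1 : Nat) : Int) := by push_cast; ring
      rw [if_pos ⟨by simp [h], by omega⟩, if_neg (by simp [h, hb]), hadd,
        pvScanUp_eq_nextD]
termination_by n - k
decreasing_by omega

-- dict lookup after a fold of inserts with keys the port never inserts: unchanged
theorem pvGetD_insertFold_not_mem (l : List Nat) (f : Nat → Int) (dct : PySem.Dict Int Int)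
    (k : Nat) :
    k ∉ l → (l.foldl (fun dd i => dd.insert (i : Int) (f i)) dct).getD (k : Int) 0
    = dct.getD (k : Int) 0 := by
  induction l generalizing dct with
  | nil => intro _; rfl
  | cons i t ih =>
    intro hk
    rw [List.foldl_cons, ih _ (by simp_all), PySem.Dict.getD_insert,
      if_neg (by simp_all)]

-- dict lookup after a fold of inserts with distinct keys: the inserted value
theorem pvGetD_insertFold_mem (l : List Nat) (f : Nat → Int) (dct : PySem.Dict Int Int)
    (k : Nat) :
    l.Nodup → k ∈ l →
    (l.foldl (fun dd i => dd.insert (i : Int) (f i)) dct).getD (k : Int) 0 = f k := by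
  induction l generalizing dct with
  | nil => intro _ hk; cases hk
  | cons i t ih =>
    intro hnd hk
    rw [List.foldl_cons]
    by_cases hki : k = i
    · subst hki
      rw [pvGetD_insertFold_not_mem t f _ k (by simp_all), PySem.Dict.getD_insert_self]
    · exact ih _ (by simp_all) (by simp_all)

theorem pvBuildPrev_inv (content d : String) (m : Nat) (dct : PySem.Dict Int Int) :
    (List.range m).foldl
      (fun (st : Int × PySem.Dict Int Int) (i : Nat) =>
        let last := if pvCharEq content (i : Int) d then (i : Int) else st.1
        (last, st.2.insert (i : Int) last)) ((0 : Int), dct)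
    = ((if m = 0 then 0 else pvLastD content d (m - 1)),
       (List.range m).foldl (fun dd i => dd.insert (i : Int) (pvLastD content d i)) dct) := by
  induction m generalizing dct with
  | zero => simp
  | succ m ih =>
    rw [List.range_succ, List.foldl_append, List.foldl_append, ih dct, List.foldl_cons,
      List.foldl_nil, List.foldl_cons, List.foldl_nil]
    have hstep : (if pvCharEq content (m : Int) d then (m : Int)
        else (if m = 0 then 0 else pvLastD content d (m - 1))) = pvLastD content d m := by
      cases m with
      | zero => simp [pvLastD]
      | succ k => rw [pvLastD]; simp
    simp [hstep]

theorem pvNextD_unfold (content d : String) (n k : Nat) (hk : k + 2 ≤ n) :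
    (if pvCharEq content ((k : Nat) : Int) d then ((k : Nat) : Int)
      else pvNextD content d n (k + 1)) = pvNextD content d n k := by
  conv_rhs => rw [pvNextD]
  by_cases h : pvCharEq content ((k : Nat) : Int) d
  · rw [if_pos h, if_pos (Or.inl h)]
  · rw [if_neg h, if_neg (by rintro (hc | hb); exacts [h hc, by omega])]

theorem pvBuildNxt_inv (content d : String) (n m : Nat) (dct : PySem.Dict Int Int)
    (hm : m + 2 ≤ n) :
    (List.range (m + 1)).reverse.foldl
      (fun (st : Int × PySem.Dict Int Int) (i : Nat) =>
        let v := if pvCharEq content (i : Int) d then (i : Int) else st.1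
        (v, st.2.insert (i : Int) v)) (pvNextD content d n (m + 1), dct)
    = (pvNextD content d n 0,
       (List.range (m + 1)).reverse.foldl
         (fun dd i => dd.insert (i : Int) (pvNextD content d n i)) dct) := by
  induction m generalizing dct with
  | zero =>
    simp only [Nat.zero_add, List.range_one, List.reverse_singleton, List.foldl_cons,
      List.foldl_nil]
    rw [pvNextD_unfold content d n 0 (by omega)]
  | succ m ih =>
    rw [List.range_succ, List.reverse_append, List.reverse_singleton, List.singleton_append,
      List.foldl_cons, List.foldl_cons]
    simp only []
    rw [pvNextD_unfold content d n (m + 1) (by omega)]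
    rw [ih (dct.insert ((m + 1 : Nat) : Int) (pvNextD content d n (m + 1))) (by omega)]

theorem pvBuildPrev_eq (content d : String) (k : Nat) (hk : k < content.toList.length) :
    (pvBuildPrev content d).getD (k : Int) 0 = pvLastD content d k := by
  unfold pvBuildPrev
  rw [PySem.Str.len_eq, Int.toNat_natCast, pvBuildPrev_inv content d _ PySem.Dict.empty]
  exact pvGetD_insertFold_mem _ _ _ _ (List.nodup_range) (List.mem_range.mpr hk)

theorem pvBuildNxt_eq (content d : String) (k : Nat) (hk : k < content.toList.length) :
    (pvBuildNxt content d).getD (k : Int) 0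
    = pvNextD content d content.toList.length k := by
  unfold pvBuildNxt
  rw [PySem.Str.len_eq, Int.toNat_natCast]
  cases hn : content.toList.length with
  | zero => omega
  | succ N =>
    have hfirst : (if pvCharEq content ((N : Nat) : Int) d then ((N : Nat) : Int)
        else ((N + 1 : Nat) : Int) - 1) = pvNextD content d (N + 1) N := by
      rw [pvNextD, if_pos (Or.inr (by omega))]
      split <;> push_cast <;> ring
    rw [List.range_succ, List.reverse_append, List.reverse_singleton, List.singleton_append,
      List.foldl_cons]
    simp only [hfirst]
    have hkN : k < N + 1 := by omega
    cases N with
    | zero =>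
      simp only [List.range_zero, List.reverse_nil, List.foldl_nil]
      have hk0 : k = 0 := by omega
      subst hk0
      rw [PySem.Dict.getD_insert_self]
    | succ K =>
      rw [pvBuildNxt_inv content d (K + 2) K _ (by omega)]
      by_cases hkK : k < K + 1
      · exact pvGetD_insertFold_mem _ _ _ _ (List.nodup_reverse.mpr List.nodup_range)
          (by simpa using List.mem_range.mpr hkK)
      · have hkk : k = K + 1 := by omega
        subst hkk
        rw [pvGetD_insertFold_not_mem _ _ _ _ (by simp), PySem.Dict.getD_insert_self]

-- ===== VERDICT (by name: the statement is the Claim_ definition above) =====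
theorem getContext_spec : Claim_equal_getContext := by
  intro lm content inc d _hdom hpre
  unfold Spec_getContext getContext getContext_alt
  rw [PySem.List.foldl_append_singleton_eq_map, PySem.List.foldl_append_singleton_eq_map]
  simp only [List.nil_append]
  refine List.map_congr_left ?_
  intro m hm
  obtain ⟨hs0, hsn, he0, hen⟩ := hpre m hm
  have hs : m.2.1 = ((m.2.1.toNat : Nat) : Int) := by omega
  have he : m.2.2 = ((m.2.2.toNat : Nat) : Int) := by omega
  have hcs : PySem.Dict.getD (pvBuildPrev content d) m.2.1 0
      = pvScanDown content d m.2.1 := by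
    conv_lhs => rw [hs]
    conv_rhs => rw [hs]
    rw [pvBuildPrev_eq content d m.2.1.toNat (by omega), pvScanDown_eq_lastD]
  have hce : PySem.Dict.getD (pvBuildNxt content d) m.2.2 0
      = pvScanUp content d (PySem.Str.len content - 1) m.2.2 := by
    conv_lhs => rw [he]
    conv_rhs => rw [he]
    rw [pvBuildNxt_eq content d m.2.2.toNat (by omega), PySem.Str.len_eq, pvScanUp_eq_nextD]
  simp only [hcs, hce]
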